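-- pv_equiv track=rewrite | github.com/wwd1015/IRIS-D | src/dashboard/utils/custom_metrics.py | _split_at_logic
-- ===== SOURCE A (Python) =====
-- def _split_at_logic(tokens: list[dict], keyword: str) -> list[list[dict]]:
--     """Split token list at top-level (depth-0) occurrences of a logic keyword.
--
--     Returns a list of token groups. If keyword is not found at depth 0,
--     returns a single-element list containing the original tokens.
--     """
--     groups: list[list[dict]] = []
--     current: list[dict] = []
--     depth = 0
--     for tok in tokens:
--         t, v = tok.get("type", ""), tok.get("value", "")
--         if t == "operator" and v == "(":
--             depth += 1
--         elif t == "operator" and v == ")":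
--             depth -= 1
--         if depth == 0 and t == "operator" and v == keyword:
--             groups.append(current)
--             current = []
--         else:
--             current.append(tok)
--     groups.append(current)
--     return groups
-- ===== SOURCE B (Python) =====
-- def _split_at_logic(tokens: list[dict], keyword: str) -> list[list[dict]]:
--     """Two-pass variant: first record top-level separator indices, then
--     partition the token list by slicing between them."""
--     split_idx = []
--     depth = 0
--     for i, tok in enumerate(tokens):
--         t, v = tok.get("type", ""), tok.get("value", "")
--         if t == "operator" and v == "(":
--             depth += 1
--         elif t == "operator" and v == ")":
--             depth -= 1
--         if depth == 0 and t == "operator" and v == keyword: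
--             split_idx.append(i)
--     groups = []
--     start = 0
--     for idx in split_idx:
--         groups.append(tokens[start:idx])
--         start = idx + 1
--     groups.append(tokens[start:])
--     return groups
-- ===== Notes on version B (the rewrite author's own statement) =====
-- stated objective: alternative
-- what changed: B replaces A's single accumulate-as-you-go loop with two phases: a first pass that only records the indices of top-level separator tokens, and a second pass that partitions the token list by slicing between those indices.
import Mathlib
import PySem

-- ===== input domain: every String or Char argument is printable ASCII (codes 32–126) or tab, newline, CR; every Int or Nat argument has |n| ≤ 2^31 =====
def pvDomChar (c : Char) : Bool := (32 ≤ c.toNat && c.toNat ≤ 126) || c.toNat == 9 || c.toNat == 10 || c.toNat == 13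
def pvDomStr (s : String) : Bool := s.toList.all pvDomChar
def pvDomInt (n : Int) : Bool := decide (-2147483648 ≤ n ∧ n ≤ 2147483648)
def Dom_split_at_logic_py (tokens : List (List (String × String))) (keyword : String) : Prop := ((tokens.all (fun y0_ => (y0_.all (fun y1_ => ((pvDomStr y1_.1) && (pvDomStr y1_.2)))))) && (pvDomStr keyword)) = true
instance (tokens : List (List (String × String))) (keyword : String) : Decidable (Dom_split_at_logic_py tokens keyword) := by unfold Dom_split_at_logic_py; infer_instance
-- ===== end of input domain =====

-- B is an alternative decomposition: a first pass records the indices of top-level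
-- separator tokens, a second pass partitions the token list by slicing between them.

-- ===== PORT A =====
-- A's loop: state (groups, current, depth), one token at a time.
def splitALoop (keyword : String) :
    List (List (String × String)) → List (List (List (String × String))) →
    List (List (String × String)) → Int → List (List (List (String × String)))
  | [], groups, current, _ => groups ++ [current]
  | tok :: rest, groups, current, depth =>
    let t := (PySem.Dict.mk tok).getD "type" ""
    let v := (PySem.Dict.mk tok).getD "value" ""
    let depth' := if t == "operator" && v == "(" then depth + 1
      else if t == "operator" && v == ")" then depth - 1 else depth
    if depth' == 0 && t == "operator" && v == keyword then
      splitALoop keyword rest (groups ++ [current]) [] depth'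
    else
      splitALoop keyword rest groups (current ++ [tok]) depth'

def split_at_logic_py (tokens : List (List (String × String))) (keyword : String) : List (List (List (String × String))) :=
  splitALoop keyword tokens [] [] 0

-- ===== PORT B =====
-- Pass 1 of Source B: enumerate, keep only the indices of top-level separators.
def splitIdxLoop (keyword : String) :
    List (List (String × String)) → Nat → Int → List Nat
  | [], _, _ => []
  | tok :: rest, i, depth =>
    let t := (PySem.Dict.mk tok).getD "type" ""
    let v := (PySem.Dict.mk tok).getD "value" ""
    let depth' := if t == "operator" && v == "(" then depth + 1
      else if t == "operator" && v == ")" then depth - 1 else depth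
    if depth' == 0 && t == "operator" && v == keyword then
      i :: splitIdxLoop keyword rest (i + 1) depth'
    else
      splitIdxLoop keyword rest (i + 1) depth'

-- Pass 2 of Source B: slice the token list between the recorded indices.
def sliceLoop (tokens : List (List (String × String))) :
    List Nat → Nat → List (List (List (String × String)))
  | [], start => [PySem.List.slice tokens (some (start : Int)) none]
  | idx :: rest, start =>
    PySem.List.slice tokens (some (start : Int)) (some (idx : Int)) :: sliceLoop tokens rest (idx + 1)

def split_at_logic_py_alt (tokens : List (List (String × String))) (keyword : String) : List (List (List (String × String))) :=
  sliceLoop tokens (splitIdxLoop keyword tokens 0 0) 0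

-- ===== PRECONDITION & SPEC =====
def Spec_split_at_logic_py (tokens : List (List (String × String))) (keyword : String) (out : List (List (List (String × String)))) : Prop := out = split_at_logic_py_alt tokens keyword
instance (tokens : List (List (String × String))) (keyword : String) (out : List (List (List (String × String)))) : Decidable (Spec_split_at_logic_py tokens keyword out) := by unfold Spec_split_at_logic_py; infer_instance

-- ===== CLAIM (what is proved, stated in full; the proofs are below) =====
def Claim_equal_split_at_logic_py : Prop := ∀ (tokens : List (List (String × String))) (keyword : String), Dom_split_at_logic_py tokens keyword → Spec_split_at_logic_py tokens keyword (split_at_logic_py tokens keyword)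

-- ===== LEMMAS AND PROOFS =====

-- Invariant tying A's running 'current' to B's slices: if 'suf' is the suffix of
-- 'full' starting at position k and 'current' is full[start:k], then A's loop on
-- 'suf' equals 'groups' followed by B's second pass over the indices its first
-- pass emits on 'suf'.
theorem split_main (keyword : String) (suf : List (List (String × String))) :
    ∀ (k start : Nat) (full : List (List (String × String)))
      (groups : List (List (List (String × String)))) (depth : Int),
      full.drop k = suf → start ≤ k →
      splitALoop keyword suf groups ((full.drop start).take (k - start)) depth
        = groups ++ sliceLoop full (splitIdxLoop keyword suf k depth) start := by
  induction suf with
  | nil =>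
    intro k start full groups depth hdrop hle
    simp only [splitALoop, splitIdxLoop, sliceLoop]
    rw [PySem.List.slice_from_natCast]
    have hlen : full.length ≤ k := by
      by_contra h
      have := List.drop_eq_nil_iff.mp hdrop
      omega
    have : (full.drop start).length ≤ k - start := by
      simp only [List.length_drop]; omega
    rw [List.take_of_length_le this]
  | cons tok rest ih =>
    intro k start full groups depth hdrop hle
    have hk : k < full.length := by
      by_contra h
      rw [List.drop_eq_nil_iff.mpr (by omega)] at hdrop
      simp at hdrop
    have hget : full[k]? = some tok := by
      have h0 := congrArg (fun (l : List (List (String × String))) => l[0]?) hdrop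
      simpa [List.getElem?_drop] using h0
    have hdrop' : full.drop (k + 1) = rest := by
      have h1 : full.drop (k+1) = (full.drop k).drop 1 := by rw [List.drop_drop]
      rw [h1, hdrop]; rfl
    simp only [splitALoop, splitIdxLoop]
    by_cases hc : (((if ((PySem.Dict.mk tok).getD "type" "" == "operator" && (PySem.Dict.mk tok).getD "value" "" == "(") then depth + 1
        else if ((PySem.Dict.mk tok).getD "type" "" == "operator" && (PySem.Dict.mk tok).getD "value" "" == ")") then depth - 1 else depth) == 0)
        && (PySem.Dict.mk tok).getD "type" "" == "operator" && (PySem.Dict.mk tok).getD "value" "" == keyword) = true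
    · simp only [hc, if_pos]
      have H := ih (k+1) (k+1) full (groups ++ [(full.drop start).take (k - start)])
        (if ((PySem.Dict.mk tok).getD "type" "" == "operator" && (PySem.Dict.mk tok).getD "value" "" == "(") then depth + 1
         else if ((PySem.Dict.mk tok).getD "type" "" == "operator" && (PySem.Dict.mk tok).getD "value" "" == ")") then depth - 1 else depth)
        hdrop' (by omega)
      simp only [Nat.sub_self, List.take_zero] at H
      rw [H]
      simp only [sliceLoop, List.append_assoc, List.cons_append, List.nil_append]
      rw [PySem.List.slice_natCast]
    · simp only [hc, if_neg, Bool.false_eq_true, not_false_eq_true]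
      have harg : (full.drop start).take (k - start) ++ [tok]
          = (full.drop start).take (k + 1 - start) := by
        have h1 : k + 1 - start = (k - start) + 1 := by omega
        rw [h1, List.take_add_one]
        have h2 : (full.drop start)[k - start]? = some tok := by
          rw [List.getElem?_drop]
          have h3 : start + (k - start) = k := by omega
          rw [h3, hget]
        rw [h2]; rfl
      rw [harg, ih (k+1) start full groups _ hdrop' (by omega)]

-- ===== VERDICT (by name: the statement is the Claim_ definition above) =====
theorem split_at_logic_py_spec : Claim_equal_split_at_logic_py := by
  intro tokens keyword _
  unfold Spec_split_at_logic_py split_at_logic_py split_at_logic_py_alt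
  have := split_main keyword tokens 0 0 tokens [] 0 (by simp) (Nat.le_refl 0)
  simpa using this
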